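-- pv_equiv track=rewrite | github.com/Elan456/StarTrader | utils.py | longTextnewLines
-- ===== SOURCE A (Python) =====
-- def longTextnewLines(text, maxchars):  # Puts ~ where new line should be
--
--     chars = 0
--     newstring = ""
--     for c in text:
--         chars += 1
--
--         if chars > maxchars and c == " ":
--             newstring += "~"
--             chars = 0
--         else:
--             newstring += c
--
--     return newstring
-- ===== SOURCE B (Python) =====
-- def longTextnewLines(text, maxchars):  # Puts ~ where new line should be
--     k = max(maxchars, 0)
--     parts = []
--     start = 0
--     while True:
--         pos = text.find(" ", start + k)
--         if pos == -1:
--             parts.append(text[start:])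
--             return "".join(parts)
--         parts.append(text[start:pos] + "~")
--         start = pos + 1
-- ===== Notes on version B (the rewrite author's own statement) =====
-- stated objective: faster
-- what changed: B replaces A's per-character Python loop with a cursor-based while-loop that jumps from segment to segment via str.find(' ', start + max(maxchars, 0)) and slices whole segments into the output, doing the scanning in C instead of bytecode.
import Mathlib
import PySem

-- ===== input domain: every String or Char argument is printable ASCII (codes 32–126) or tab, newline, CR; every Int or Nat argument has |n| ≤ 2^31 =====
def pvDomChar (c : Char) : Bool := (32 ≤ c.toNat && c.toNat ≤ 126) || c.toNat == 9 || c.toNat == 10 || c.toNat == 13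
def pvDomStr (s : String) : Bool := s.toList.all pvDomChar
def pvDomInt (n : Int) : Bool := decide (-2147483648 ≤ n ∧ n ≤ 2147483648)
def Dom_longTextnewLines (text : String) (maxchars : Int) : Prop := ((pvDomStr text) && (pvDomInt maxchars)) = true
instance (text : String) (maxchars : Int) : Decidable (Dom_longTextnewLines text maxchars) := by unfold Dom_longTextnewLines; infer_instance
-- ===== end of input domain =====

-- B walks the text segment-by-segment with str.find instead of A's char-by-char counter loop;
-- same values everywhere (return-value equivalence; neither mutates anything).

-- ===== PORT A =====
-- A's for-loop over the characters with the counter `chars`; output built char by char.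
def goA_longTextnewLines (maxchars : Int) : List Char → Int → List Char
  | [], _ => []
  | c :: rest, chars =>
      if chars + 1 > maxchars ∧ c = ' ' then '~' :: goA_longTextnewLines maxchars rest 0
      else c :: goA_longTextnewLines maxchars rest (chars + 1)

def longTextnewLines (text : String) (maxchars : Int) : String :=
  String.ofList (goA_longTextnewLines maxchars text.toList 0)

-- ===== PORT B =====
-- Source B's while-loop: the cursor `start` is represented by the remaining suffix `l`;
-- `text.find(" ", start + k)` is the first space of `l` at index ≥ k (idxOf? on `l.drop k`).
def goB_longTextnewLines (k : Nat) (l : List Char) : List Char :=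
  match h : (l.drop k).idxOf? ' ' with
  | none => l
  | some i =>
      l.take (k + i) ++ '~' :: goB_longTextnewLines k (l.drop (k + i + 1))
termination_by l.length
decreasing_by
  have hi : i < (l.drop k).length := (List.idxOf?_eq_some_iff.mp h).1
  simp [List.length_drop] at hi ⊢
  omega

def longTextnewLines_alt (text : String) (maxchars : Int) : String :=
  String.ofList (goB_longTextnewLines (max maxchars 0).toNat text.toList)

-- ===== PRECONDITION & SPEC =====
def Spec_longTextnewLines (text : String) (maxchars : Int) (out : String) : Prop := out = longTextnewLines_alt text maxchars
instance (text : String) (maxchars : Int) (out : String) : Decidable (Spec_longTextnewLines text maxchars out) := by unfold Spec_longTextnewLines; infer_instance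

-- ===== CLAIM (what is proved, stated in full; the proofs are below) =====
def Claim_equal_longTextnewLines : Prop := ∀ (text : String) (maxchars : Int), Dom_longTextnewLines text maxchars → Spec_longTextnewLines text maxchars (longTextnewLines text maxchars)

-- ===== LEMMAS AND PROOFS =====

-- Proof-side generalisation of goB: the FIRST segment searches from offset j, later ones from k.
def goBg_longTextnewLines (k j : Nat) (l : List Char) : List Char :=
  match h : (l.drop j).idxOf? ' ' with
  | none => l
  | some i =>
      l.take (j + i) ++ '~' :: goBg_longTextnewLines k k (l.drop (j + i + 1))
termination_by l.length
decreasing_by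
  have hi : i < (l.drop j).length := (List.idxOf?_eq_some_iff.mp h).1
  simp [List.length_drop] at hi ⊢
  omega

theorem goB_none (k : Nat) (l : List Char) (h : (l.drop k).idxOf? ' ' = none) :
    goB_longTextnewLines k l = l := by
  rw [goB_longTextnewLines]; split <;> simp_all

theorem goB_some (k : Nat) (l : List Char) (i : Nat) (h : (l.drop k).idxOf? ' ' = some i) :
    goB_longTextnewLines k l = l.take (k + i) ++ '~' :: goB_longTextnewLines k (l.drop (k + i + 1)) := by
  rw [goB_longTextnewLines]; split <;> simp_all

theorem goBg_none (k j : Nat) (l : List Char) (h : (l.drop j).idxOf? ' ' = none) :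
    goBg_longTextnewLines k j l = l := by
  rw [goBg_longTextnewLines]; split <;> simp_all

theorem goBg_some (k j : Nat) (l : List Char) (i : Nat) (h : (l.drop j).idxOf? ' ' = some i) :
    goBg_longTextnewLines k j l = l.take (j + i) ++ '~' :: goBg_longTextnewLines k k (l.drop (j + i + 1)) := by
  rw [goBg_longTextnewLines]; split <;> simp_all

theorem goBg_eq_goB (k : Nat) (l : List Char) :
    goBg_longTextnewLines k k l = goB_longTextnewLines k l := by
  induction l using goB_longTextnewLines.induct k with
  | case1 l h => rw [goBg_none k k l h, goB_none k l h]
  | case2 l i h ih => rw [goBg_some k k l i h, goB_some k l i h, ih]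

theorem goA_eq_goBg (m : Int) (k : Nat) (hk : k = (max m 0).toNat)
    (l : List Char) (c : Int) (hc : 0 ≤ c) :
    goA_longTextnewLines m l c = goBg_longTextnewLines k ((k : Int) - c).toNat l := by
  induction l generalizing c with
  | nil =>
      rw [goBg_none _ _ _ (by simp)]
      simp [goA_longTextnewLines]
  | cons ch rest ih =>
      by_cases hbr : c + 1 > m ∧ ch = ' '
      · -- break: the triggering space is the first space at offset ≥ j, and j = 0
        have hj0 : ((k : Int) - c).toNat = 0 := by omega
        have hidx : (((ch :: rest).drop (((k : Int) - c).toNat)).idxOf? ' ') = some 0 := by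
          simp [hj0, List.idxOf?_cons, hbr.2]
        rw [goBg_some _ _ _ 0 hidx]
        have hA : goA_longTextnewLines m (ch :: rest) c = '~' :: goA_longTextnewLines m rest 0 := by
          simp [goA_longTextnewLines, hbr]
        rw [hA, ih 0 le_rfl, show ((k : Int) - 0).toNat = k by omega]
        simp [hj0]
      · -- no break at ch
        have hA : goA_longTextnewLines m (ch :: rest) c
            = ch :: goA_longTextnewLines m rest (c + 1) := by
          simp only [goA_longTextnewLines, if_neg hbr]
        rw [hA, ih (c + 1) (by omega)]
        by_cases hjz : ((k : Int) - c).toNat = 0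
        · -- c ≥ k, so the search offsets are both 0 and ch ≠ ' '
          have hch : ¬ (ch == ' ') := by
            simp only [beq_iff_eq]
            intro hsp
            exact hbr ⟨by omega, hsp⟩
          have hj'0 : ((k : Int) - (c + 1)).toNat = 0 := by omega
          rw [hjz, hj'0]
          cases hrest : rest.idxOf? ' ' with
          | none =>
              rw [goBg_none k 0 rest (by simpa using hrest),
                  goBg_none k 0 (ch :: rest)
                    (by simp [List.idxOf?_cons, hch, hrest])]
          | some i =>
              rw [goBg_some k 0 rest i (by simpa),
                  goBg_some k 0 (ch :: rest) (i + 1) (by simp [List.idxOf?_cons, hch, hrest])]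
              simp
        · -- c < k: the offset for (ch :: rest) is one more than for rest
          have hjj' : ((k : Int) - c).toNat = ((k : Int) - (c + 1)).toNat + 1 := by omega
          rw [hjj']
          have hd : (ch :: rest).drop (((k : Int) - (c + 1)).toNat + 1)
              = rest.drop (((k : Int) - (c + 1)).toNat) := by simp
          cases hrest : (rest.drop (((k : Int) - (c + 1)).toNat)).idxOf? ' ' with
          | none =>
              rw [goBg_none k (((k : Int) - (c + 1)).toNat) rest hrest,
                  goBg_none k (((k : Int) - (c + 1)).toNat + 1) (ch :: rest) (by rw [hd]; exact hrest)]
          | some i =>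
              rw [goBg_some k (((k : Int) - (c + 1)).toNat + 1) (ch :: rest) i (by rw [hd]; exact hrest),
                  goBg_some k (((k : Int) - (c + 1)).toNat) rest i hrest]
              rw [show ((k : Int) - (c + 1)).toNat + 1 + i = (((k : Int) - (c + 1)).toNat + i) + 1 by omega]
              simp

-- ===== VERDICT (by name: the statement is the Claim_ definition above) =====
theorem longTextnewLines_spec : Claim_equal_longTextnewLines := by
  intro text m _
  unfold Spec_longTextnewLines longTextnewLines longTextnewLines_alt
  rw [goA_eq_goBg m (max m 0).toNat rfl text.toList 0 le_rfl,
      show (((max m 0).toNat : Int) - 0).toNat = (max m 0).toNat by omega,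
      goBg_eq_goB]
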